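-- pv_equiv track=rewrite | github.com/Bill-GD/InfoSecurity | AES.py | galois
-- ===== SOURCE A (Python) =====
-- def multiply_binary_poly(bin1: str, bin2: str):
--     bin1_list, bin2_list = list(bin1)[::-1], list(bin2)[::-1]
--     result = ['0']*16
--
--     for bit1 in range(len(bin1)):
--         if bin1_list[bit1] == '0':
--             continue
--         for bit2 in range(len(bin2)):
--             if bin2_list[bit2] == '0':
--                 continue
--             result[bit1 + bit2] = '1' if bin1_list[bit1] == '1' and bin2_list[bit2] == '1' and result[bit1 + bit2] == '0' else '0'
--     return ''.join(result[::-1])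
--
-- def divide_binary_poly(bin1: str, bin2: str):
--     bin1_list, bin2_list = list(bin1)[::-1], list(bin2)[::-1]
--     result = ['0']*len(bin2)
--     max_expo_2 = ''.join(bin2_list).rfind('1')
--     # while max expo of 1st is not smaller than max expo of 2nd
--     while ''.join(bin1_list).rfind('1') >= max_expo_2:
--         max_expo_1 = ''.join(bin1_list).rfind('1')
--         res_expo = max_expo_1 - max_expo_2
--         result[res_expo] = '1'
--         for bit2 in range(len(bin2)):
--             if bin2_list[bit2] == '0':
--                 continue
--             bin1_list[bit2 + res_expo] = '0' if bin1_list[bit2 +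
--                                                           res_expo] == '1' else '1'
--     return ''.join(bin1_list[0:len(bin2)][::-1])
--
-- def galois(hex_list1: list[str], hex_list2: list[str]):
--     result = ''
--     for i in range(len(hex_list1)):
--         mult = multiply_binary_poly(
--             bin(int(hex_list1[i], 16))[2:].zfill(8), bin(int(hex_list2[i], 16))[2:].zfill(8))
--         div = divide_binary_poly(mult, '100011011')
--         result = div if result == '' else bin(int(result, 2) ^ int(div, 2))
--     return hex(int(result, 2))[2:].zfill(2)
-- ===== SOURCE B (Python) =====
-- def galois(hex_list1, hex_list2):
--     # GF(2^8) works on bytes: reject out-of-byte operands up front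
--     for i in range(len(hex_list1)):
--         if not (0 <= int(hex_list1[i], 16) <= 0xFF and 0 <= int(hex_list2[i], 16) <= 0xFF):
--             raise ValueError("galois expects byte-valued (00..ff) hex operands")
--     acc = 0
--     for i in range(len(hex_list1)):
--         a = int(hex_list1[i], 16)
--         b = int(hex_list2[i], 16)
--         p = 0
--         for _ in range(8):
--             if a % 2:
--                 p ^= b
--             a //= 2
--             b *= 2
--             if b >= 0x100:
--                 b ^= 0x11B
--         acc ^= p
--     return format(acc, '02x')
-- ===== Notes on version B (the rewrite author's own statement) =====
-- stated objective: faster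
-- what changed: Replaces A's string-based polynomial arithmetic (16-slot char-buffer schoolbook multiply followed by long-division reduction by '100011011') with an integer Russian-peasant GF(2^8) multiply that reduces by 0x11B inline at every doubling, XOR-accumulating into an int and formatting once at the end; B validates the byte (00..ff) operand domain up front, as the task hint suggests.
-- outside the precondition, e.g. on galois(['100'], ['2']): A returns '36', B raises ValueError; on galois(['-1f'], ['2']): A returns '3e', B raises ValueError
import Mathlib
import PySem

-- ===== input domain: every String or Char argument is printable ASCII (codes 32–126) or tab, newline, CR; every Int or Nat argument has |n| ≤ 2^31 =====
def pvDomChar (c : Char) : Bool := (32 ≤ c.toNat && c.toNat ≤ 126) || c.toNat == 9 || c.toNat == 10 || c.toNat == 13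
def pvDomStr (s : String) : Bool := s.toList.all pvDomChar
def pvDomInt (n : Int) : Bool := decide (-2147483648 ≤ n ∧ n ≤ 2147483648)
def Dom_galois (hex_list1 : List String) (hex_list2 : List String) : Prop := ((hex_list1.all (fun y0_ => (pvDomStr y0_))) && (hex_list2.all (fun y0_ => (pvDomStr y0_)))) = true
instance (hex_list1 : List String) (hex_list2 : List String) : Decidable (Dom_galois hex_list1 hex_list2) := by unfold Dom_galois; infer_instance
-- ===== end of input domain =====

-- B replaces A's string-based GF(2^8) arithmetic (char-buffer polynomial multiply + string long
-- division by '100011011') with an integer Russian-peasant multiply reducing by 0x11B inline.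

-- ===== PORT A =====
-- hand-written helper: ''.join(l).rfind('1') — index of the last '1' (each list element is one
-- char here, so join/rfind over the list is exact); -1 when absent, as in Python
def pvRfind1 : List Char → Int
  | [] => -1
  | c :: rest =>
    let r := pvRfind1 rest
    if r ≥ 0 then r + 1 else if c = '1' then 0 else -1

-- inner `for bit2 in range(len(bin2))` loop of multiply_binary_poly
def pvMulInner (l1 l2 : List Char) (bit1 : Nat) (res : List Char) : List Char :=
  (List.range l2.length).foldl (fun res bit2 =>
    if l2.getD bit2 ' ' = '0' then res
    else res.set (bit1 + bit2)
      (if l1.getD bit1 ' ' = '1' ∧ l2.getD bit2 ' ' = '1' ∧ res.getD (bit1 + bit2) ' ' = '0'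
       then '1' else '0')) res

def pvMultiplyBinaryPoly (bin1 bin2 : List Char) : List Char :=
  let l1 := bin1.reverse
  let l2 := bin2.reverse
  let res := (List.range bin1.length).foldl (fun res bit1 =>
    if l1.getD bit1 ' ' = '0' then res else pvMulInner l1 l2 bit1 res) (List.replicate 16 '0')
  res.reverse

-- one iteration of divide_binary_poly's while loop (Python's `result` list is write-only dead
-- state and is omitted; indexing is exact on the admitted inputs, where all indices are in range)
def pvDivStep (b2 : List Char) (maxE2 : Int) (b1 : List Char) : List Char :=
  let resExpo := (pvRfind1 b1 - maxE2).toNat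
  (List.range b2.length).foldl (fun b1 bit2 =>
    if b2.getD bit2 ' ' = '0' then b1
    else b1.set (bit2 + resExpo) (if b1.getD (bit2 + resExpo) ' ' = '1' then '0' else '1')) b1

-- the while loop; fuel only makes it total (on the inputs galois feeds it, at most 8 iterations
-- run and the fuel bin1.length+1 = 17 is never exhausted — proved below)
def pvDivLoop (b2 : List Char) (maxE2 : Int) : Nat → List Char → List Char
  | 0, b1 => b1
  | fuel+1, b1 =>
    if pvRfind1 b1 ≥ maxE2 then pvDivLoop b2 maxE2 fuel (pvDivStep b2 maxE2 b1) else b1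

def pvDivideBinaryPoly (bin1 bin2 : List Char) : List Char :=
  let b1 := bin1.reverse
  let b2 := bin2.reverse
  let final := pvDivLoop b2 (pvRfind1 b2) (bin1.length + 1) b1
  (final.take bin2.length).reverse

def pvPoly : List Char := ['1', '0', '0', '0', '1', '1', '0', '1', '1']

-- bin(n)[2:]  (for n < 0, bin gives '-0b…' so [2:] keeps the 'b'; such n are outside Pre_)
def pvBinDrop2 (n : Int) : List Char := (PySem.Int.toBinChars0b n).drop 2

def pvHexDigitChar (d : Nat) : Char := if d < 10 then Char.ofNat (48 + d) else Char.ofNat (87 + d)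

-- lowercase hex digits of n (empty for 0); hand-written: PySem has no hex formatter
def pvHexChars (n : Nat) : List Char :=
  if h : n = 0 then [] else pvHexChars (n / 16) ++ [pvHexDigitChar (n % 16)]
  decreasing_by exact Nat.div_lt_self (Nat.pos_of_ne_zero h) (by norm_num)

def pvHexNat (n : Nat) : List Char := if n = 0 then ['0'] else pvHexChars n

-- hex(v)[2:]  (for v < 0, hex gives '-0x…' so [2:] keeps the 'x'; never reached inside Pre_)
def pvHexDrop2 (v : Int) : List Char :=
  if v < 0 then 'x' :: pvHexNat (-v).toNat else pvHexNat v.toNat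

def galois (hex_list1 : List String) (hex_list2 : List String) : String :=
  let result := (List.range hex_list1.length).foldl (fun result i =>
    -- int(hex_list[i], 16): Pre_ excludes inputs where Python raises, so .getD 0 is never taken
    let h1 := (PySem.Int.ofStrBase? (hex_list1.getD i "") 16).getD 0
    let h2 := (PySem.Int.ofStrBase? (hex_list2.getD i "") 16).getD 0
    let mult := pvMultiplyBinaryPoly (PySem.Chars.zfill (pvBinDrop2 h1) 8)
                                     (PySem.Chars.zfill (pvBinDrop2 h2) 8)
    let div := pvDivideBinaryPoly mult pvPoly
    if result = [] then div
    else '0' :: 'b' :: pvBinDrop2 (PySem.Int.bxor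
      ((PySem.Int.ofCharsBase? result 2).getD 0) ((PySem.Int.ofCharsBase? div 2).getD 0))) []
  String.ofList (PySem.Chars.zfill (pvHexDrop2 ((PySem.Int.ofCharsBase? result 2).getD 0)) 2)

-- ===== PORT B =====
-- format(v, '02x'): sign, then hex digits zero-padded to total width 2
def pvFormat02x (v : Int) : List Char :=
  if v < 0 then '-' :: PySem.Chars.zfill (pvHexNat (-v).toNat) 1
  else PySem.Chars.zfill (pvHexNat v.toNat) 2

def pvByteOk (v : Int) : Bool := decide (0 ≤ v) && decide (v ≤ 255)

def galois_alt (hex_list1 : List String) (hex_list2 : List String) : String :=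
  -- B's up-front validation loop: Python raises ValueError on a non-byte operand (no return
  -- value there; all such inputs lie outside Pre_), so the port returns "" on that path
  if (List.range hex_list1.length).all (fun i =>
      pvByteOk ((PySem.Int.ofStrBase? (hex_list1.getD i "") 16).getD 0) &&
      pvByteOk ((PySem.Int.ofStrBase? (hex_list2.getD i "") 16).getD 0)) then
  let acc := (List.range hex_list1.length).foldl (fun acc i =>
    let a := (PySem.Int.ofStrBase? (hex_list1.getD i "") 16).getD 0
    let b := (PySem.Int.ofStrBase? (hex_list2.getD i "") 16).getD 0
    let s := (List.range 8).foldl (fun (s : Int × Int × Int) _ =>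
      let p := if PySem.Int.mod s.2.1 2 ≠ 0 then PySem.Int.bxor s.1 s.2.2 else s.1
      let a' := PySem.Int.floordiv s.2.1 2
      let b' := s.2.2 * 2
      (p, a', if 256 ≤ b' then PySem.Int.bxor b' 283 else b')) (0, a, b)
    PySem.Int.bxor acc s.1) 0
  String.ofList (pvFormat02x acc)
  else ""

-- ===== PRECONDITION & SPEC =====
def pvOkByte (s : String) : Bool :=
  match PySem.Int.ofStrBase? s 16 with
  | some n => 0 ≤ n && n ≤ 255
  | none => false

-- Pre_ restricts to AES's intended domain: a nonempty list of byte-valued (0..255) hex strings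
-- with a long-enough second list.  It excludes inputs where Python A raises (empty list:
-- ValueError; short hex_list2 / non-hex entry: IndexError/ValueError; two operands > 0xff
-- overflow A's 16-slot buffer: IndexError) and also inputs with a value > 0xff or negative on
-- which A still returns: there A's answer is an accident of its non-truncating zfill(8) buffer
-- (for negatives, of treating the 'b' of '-0b…' as a polynomial bit) — see the cited examples.
def Pre_galois (hex_list1 : List String) (hex_list2 : List String) : Prop :=
  hex_list1 ≠ [] ∧ hex_list1.length ≤ hex_list2.length ∧
    ∀ i < hex_list1.length, pvOkByte (hex_list1.getD i "") = true ∧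
                            pvOkByte (hex_list2.getD i "") = true

instance (hex_list1 : List String) (hex_list2 : List String) :
    Decidable (Pre_galois hex_list1 hex_list2) := by unfold Pre_galois; infer_instance

def pvWitness_galois : List String × List String := (["57", "01"], ["83", "0x2"])

def Spec_galois (hex_list1 : List String) (hex_list2 : List String) (out : String) : Prop :=
  out = galois_alt hex_list1 hex_list2

instance (hex_list1 : List String) (hex_list2 : List String) (out : String) :
    Decidable (Spec_galois hex_list1 hex_list2 out) := by unfold Spec_galois; infer_instance

-- ===== CLAIM (what is proved, stated in full; the proofs are below) =====
def Claim_equal_galois : Prop := ∀ (hex_list1 : List String) (hex_list2 : List String),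
  Dom_galois hex_list1 hex_list2 → Pre_galois hex_list1 hex_list2 →
    Spec_galois hex_list1 hex_list2 (galois hex_list1 hex_list2)

-- ===== LEMMAS AND PROOFS =====

-- little-endian bit string of width w
def bitsLE : Nat → Nat → List Char
  | 0, _ => []
  | w+1, n => (if n % 2 = 1 then '1' else '0') :: bitsLE w (n / 2)

-- xtime: multiply a reduced byte by x, reducing by 0x11B when the shift leaves a byte
def xtN (b : Nat) : Nat := if 256 ≤ b * 2 then (b * 2) ^^^ 283 else b * 2

-- Russian-peasant GF(2^8) product (value-level spec of B's 8-round loop)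
def gfN (a b : Nat) : Nat :=
  if h : a = 0 then 0 else (if a % 2 = 1 then b else 0) ^^^ gfN (a / 2) (xtN b)
  decreasing_by exact Nat.div_lt_self (Nat.pos_of_ne_zero h) (by norm_num)

-- carry-less product with the shift kept outside the recursion
def clmN (a b : Nat) : Nat :=
  if h : a = 0 then 0 else (if a % 2 = 1 then b else 0) ^^^ (clmN (a / 2) b) <<< 1
  decreasing_by exact Nat.div_lt_self (Nat.pos_of_ne_zero h) (by norm_num)

-- top-down reduction by 0x11B (value-level spec of A's divide loop)
def pvRedN : Nat → Nat → Nat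
  | 0, m => m
  | fuel+1, m => if 256 ≤ m then pvRedN fuel (m ^^^ (283 <<< (Nat.log2 m - 8))) else m

-- Nat twin of B's loop body
def stepN (s : Nat × Nat × Nat) : Nat × Nat × Nat :=
  (if s.2.1 % 2 = 1 then s.1 ^^^ s.2.2 else s.1, s.2.1 / 2, xtN s.2.2)

theorem length_bitsLE (w n : Nat) : (bitsLE w n).length = w := by
  induction w generalizing n with
  | zero => rfl
  | succ w ih => simp [bitsLE, ih]

theorem getD_bitsLE (w n k : Nat) (h : k < w) :
    (bitsLE w n).getD k ' ' = if n.testBit k then '1' else '0' := by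
  induction w generalizing n k with
  | zero => omega
  | succ w ih =>
    cases k with
    | zero => simp [bitsLE, List.getD, Nat.testBit_zero]
    | succ k =>
      have hk : k < w := by omega
      simp only [bitsLE, List.getD_cons_succ]
      rw [ih (n / 2) k hk, Nat.testBit_succ]

theorem bitsLE_zero (w : Nat) : bitsLE w 0 = List.replicate w '0' := by
  induction w with
  | zero => rfl
  | succ w ih => simp [bitsLE, ih, List.replicate]

theorem take_bitsLE (w k n : Nat) (h : k ≤ w) : (bitsLE w n).take k = bitsLE k n := by
  induction w generalizing k n with
  | zero =>
    have : k = 0 := by omega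
    subst this; rfl
  | succ w ih =>
    cases k with
    | zero => rfl
    | succ k =>
      simp only [bitsLE, List.take_succ_cons]
      rw [ih k (n / 2) (by omega)]

theorem testBit_one_succ (i : Nat) : Nat.testBit 1 (i+1) = false := by
  rw [Nat.testBit_succ]
  simp [Nat.zero_testBit]

theorem set_flip (w n p : Nat) (h : p < w) :
    (bitsLE w n).set p (if n.testBit p then '0' else '1') = bitsLE w (n ^^^ 2 ^ p) := by
  induction p generalizing w n with
  | zero =>
    cases w with
    | zero => omega
    | succ w =>
      have h1 : (n ^^^ 2 ^ 0) % 2 = 1 - n % 2 := by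
        have hx := Nat.testBit_xor n (2 ^ 0) 0
        simp only [Nat.testBit_zero, pow_zero] at hx
        rcases Nat.mod_two_eq_zero_or_one n with h' | h' <;>
          rcases Nat.mod_two_eq_zero_or_one (n ^^^ 1) with h'' | h'' <;>
            simp [h', h''] at hx ⊢
      have h2 : (n ^^^ 2 ^ 0) / 2 = n / 2 := by
        apply Nat.eq_of_testBit_eq
        intro i
        rw [← Nat.testBit_succ, ← Nat.testBit_succ, Nat.testBit_xor, pow_zero,
          testBit_one_succ]
        simp
      simp only [bitsLE, List.set_cons_zero, h1, h2]
      rcases Nat.mod_two_eq_zero_or_one n with h' | h' <;>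
        simp [h', Nat.testBit_zero]
  | succ p ih =>
    cases w with
    | zero => omega
    | succ w =>
      have hb0 : Nat.testBit (2 ^ (p+1)) 0 = false := by
        simp [Nat.testBit_two_pow]
      have h1 : (n ^^^ 2 ^ (p+1)) % 2 = n % 2 := by
        have hx := Nat.testBit_xor n (2 ^ (p+1)) 0
        rw [hb0] at hx
        simp only [Nat.testBit_zero, Bool.xor_false] at hx
        rcases Nat.mod_two_eq_zero_or_one n with h' | h' <;>
          rcases Nat.mod_two_eq_zero_or_one (n ^^^ 2 ^ (p+1)) with h'' | h'' <;>
            simp [h', h''] at hx ⊢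
        all_goals omega
      have h2 : (n ^^^ 2 ^ (p+1)) / 2 = n / 2 ^^^ 2 ^ p := by
        apply Nat.eq_of_testBit_eq
        intro i
        rw [← Nat.testBit_succ, Nat.testBit_xor, Nat.testBit_xor, ← Nat.testBit_succ,
          Nat.testBit_two_pow, Nat.testBit_two_pow]
        by_cases hpi : p = i <;> simp [hpi]
      have h3 : n.testBit (p+1) = (n / 2).testBit p := Nat.testBit_succ n p
      simp only [bitsLE, List.set_cons_succ, h1, h2, h3]
      rw [ih w (n / 2) (by omega)]

theorem shiftLeft_xor (x y k : Nat) : (x ^^^ y) <<< k = (x <<< k) ^^^ (y <<< k) := by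
  apply Nat.eq_of_testBit_eq
  intro i
  simp [Nat.testBit_shiftLeft, Nat.testBit_xor]
  cases Decidable.em (k ≤ i) with
  | inl h => simp [h]
  | inr h => simp [h]

theorem skip_id (p j o : Nat) (h : p.testBit j = false) :
    (p >>> j) <<< (o + j) = (p >>> (j+1)) <<< (o + j + 1) := by
  apply Nat.eq_of_testBit_eq
  intro i
  simp only [Nat.testBit_shiftLeft, Nat.testBit_shiftRight]
  by_cases h1 : o + j ≤ i
  · by_cases h2 : o + j + 1 ≤ i
    · have : j + (i - (o + j)) = j + 1 + (i - (o + j + 1)) := by omega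
      simp [ge_iff_le, h1, h2, this]
    · have hi : i = o + j := by omega
      subst hi
      simp [ge_iff_le, h1, h2, Nat.sub_self, h]
  · have h2 : ¬ (o + j + 1 ≤ i) := by omega
    simp [ge_iff_le, h1, h2]

theorem flip_id (p j o : Nat) (h : p.testBit j = true) :
    (p >>> j) <<< (o + j) = 2 ^ (o + j) ^^^ ((p >>> (j+1)) <<< (o + j + 1)) := by
  apply Nat.eq_of_testBit_eq
  intro i
  simp only [Nat.testBit_shiftLeft, Nat.testBit_shiftRight, Nat.testBit_xor,
    Nat.testBit_two_pow]
  by_cases h1 : o + j ≤ i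
  · by_cases h2 : o + j + 1 ≤ i
    · have hne : ¬ (o + j = i) := by omega
      have : j + (i - (o + j)) = j + 1 + (i - (o + j + 1)) := by omega
      simp [ge_iff_le, h1, h2, hne, this]
    · have hi : i = o + j := by omega
      subst hi
      simp [ge_iff_le, h1, h2, Nat.sub_self, h]
  · have h2 : ¬ (o + j + 1 ≤ i) := by omega
    have hne : ¬ (o + j = i) := by omega
    simp [ge_iff_le, h1, h2, hne]

theorem lt_two_pow_of_high_false (m L : Nat) (h : ∀ j, L ≤ j → m.testBit j = false) :
    m < 2 ^ L := by
  have hz : m >>> L = 0 := by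
    apply Nat.eq_of_testBit_eq
    intro i
    simp [Nat.testBit_shiftRight, h (L + i) (by omega)]
  rw [Nat.shiftRight_eq_div_pow] at hz
  have := Nat.lt_of_div_eq_zero (by positivity) hz
  exact this

theorem log2_pin (m L : Nat) (h1 : 2 ^ L ≤ m) (h2 : m < 2 ^ (L+1)) : Nat.log2 m = L := by
  have hm : m ≠ 0 := by
    have : 0 < 2 ^ L := Nat.two_pow_pos L
    omega
  have ha : L ≤ Nat.log2 m := (Nat.le_log2 hm).mpr h1
  have hb : Nat.log2 m < L + 1 := (Nat.log2_lt hm).mpr h2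
  omega

-- generic "flip positions off+j for the set bits j of pat" fold
theorem flip_go (g : List Char → Nat → List Char) (pat P off : Nat)
    (hP : pat < 2 ^ P)
    (hg : ∀ x j, j < P →
      g (bitsLE 16 x) j = bitsLE 16 (if pat.testBit j then x ^^^ 2 ^ (off + j) else x)) :
    ∀ k j m, j + k = P →
      (List.range' j k).foldl g (bitsLE 16 m) = bitsLE 16 (m ^^^ ((pat >>> j) <<< (off + j))) := by
  intro k
  induction k with
  | zero =>
    intro j m hj
    have hjP : j = P := by omega
    subst hjP
    have hP0 : pat >>> j = 0 := by
      rw [Nat.shiftRight_eq_div_pow]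
      exact Nat.div_eq_of_lt hP
    simp [hP0, Nat.zero_shiftLeft]
  | succ k ih =>
    intro j m hj
    have hadd : off + (j + 1) = off + j + 1 := by omega
    rw [List.range'_succ, List.foldl_cons, hg m j (by omega)]
    cases hbit : pat.testBit j with
    | false =>
      rw [if_neg (by simp [hbit])]
      rw [ih (j+1) m (by omega), hadd]
      rw [skip_id pat j off hbit]
    | true =>
      rw [if_pos rfl]
      rw [ih (j+1) (m ^^^ 2 ^ (off + j)) (by omega), hadd]
      rw [flip_id pat j off hbit, ← Nat.xor_assoc]

theorem mulInner_spec (a b i m : Nat) (hi : i < 8) (ha : a.testBit i = true) (hb : b < 256) :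
    pvMulInner (bitsLE 8 a) (bitsLE 8 b) i (bitsLE 16 m) = bitsLE 16 (m ^^^ (b <<< i)) := by
  unfold pvMulInner
  rw [length_bitsLE 8 b, List.range_eq_range']
  have hg : ∀ x j, j < 8 →
      (fun res bit2 =>
        if (bitsLE 8 b).getD bit2 ' ' = '0' then res
        else res.set (i + bit2)
          (if (bitsLE 8 a).getD i ' ' = '1' ∧ (bitsLE 8 b).getD bit2 ' ' = '1' ∧
              res.getD (i + bit2) ' ' = '0' then '1' else '0')) (bitsLE 16 x) j
      = bitsLE 16 (if b.testBit j then x ^^^ 2 ^ (i + j) else x) := by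
    intro x j hj
    have hgj : (bitsLE 8 b).getD j ' ' = if b.testBit j then '1' else '0' :=
      getD_bitsLE 8 b j hj
    have hgi : (bitsLE 8 a).getD i ' ' = '1' := by
      rw [getD_bitsLE 8 a i hi, ha]
      simp
    have hx : (bitsLE 16 x).getD (i + j) ' ' = if x.testBit (i + j) then '1' else '0' :=
      getD_bitsLE 16 x (i + j) (by omega)
    have hsf := set_flip 16 x (i + j) (by omega)
    simp only [hgj, hgi, hx]
    cases hbj : b.testBit j with
    | false => simp
    | true =>
      cases hxb : x.testBit (i + j) with
      | false =>
        simp only [hxb] at hsf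
        simp only [if_neg (by simp : ¬ ('1' : Char) = '0')]
        simpa using hsf
      | true =>
        simp only [hxb] at hsf
        simp only [if_neg (by simp : ¬ ('1' : Char) = '0')]
        simpa using hsf
  have := flip_go (fun res bit2 =>
        if (bitsLE 8 b).getD bit2 ' ' = '0' then res
        else res.set (i + bit2)
          (if (bitsLE 8 a).getD i ' ' = '1' ∧ (bitsLE 8 b).getD bit2 ' ' = '1' ∧
              res.getD (i + bit2) ' ' = '0' then '1' else '0')) b 8 i (by omega) hg 8 0 m rfl
  simpa using this

theorem clm_even (x b : Nat) (h : x % 2 = 0) : clmN x b = (clmN (x / 2) b) <<< 1 := by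
  rw [clmN]
  by_cases hx : x = 0
  · subst hx
    rw [clmN]
    simp
  · rw [dif_neg hx, if_neg (by omega : ¬ x % 2 = 1), Nat.zero_xor]

theorem clm_odd (x b : Nat) (h : x % 2 = 1) : clmN x b = b ^^^ (clmN (x / 2) b) <<< 1 := by
  have hx : x ≠ 0 := by omega
  rw [clmN]
  simp [hx, h]

theorem mulOuter_go (a b : Nat) (hA : a < 256) (hb : b < 256) :
    ∀ k j m, j + k = 8 →
      (List.range' j k).foldl (fun res bit1 =>
          if (bitsLE 8 a).getD bit1 ' ' = '0' then res
          else pvMulInner (bitsLE 8 a) (bitsLE 8 b) bit1 res) (bitsLE 16 m)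
        = bitsLE 16 (m ^^^ ((clmN (a >>> j) b) <<< j)) := by
  intro k
  induction k with
  | zero =>
    intro j m hj
    have h8 : a >>> j = 0 := by
      rw [Nat.shiftRight_eq_div_pow]
      refine Nat.div_eq_of_lt ?_
      calc a < 256 := hA
        _ = 2 ^ 8 := by norm_num
        _ ≤ 2 ^ j := Nat.pow_le_pow_right (by norm_num) (by omega)
    rw [show clmN (a >>> j) b = 0 by rw [h8, clmN]; simp]
    simp [Nat.zero_shiftLeft]
  | succ k ih =>
    intro j m hj
    rw [List.range'_succ, List.foldl_cons]
    have hgj : (bitsLE 8 a).getD j ' ' = if a.testBit j then '1' else '0' :=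
      getD_bitsLE 8 a j (by omega)
    have hdiv : a >>> j / 2 = a >>> (j+1) := (Nat.shiftRight_succ a j).symm
    have h0 := Nat.testBit_zero (a >>> j)
    have h1 : (a >>> j).testBit 0 = a.testBit j := by
      rw [Nat.testBit_shiftRight]
      norm_num
    rw [h1] at h0
    cases hbit : a.testBit j with
    | false =>
      rw [if_pos (by rw [hgj, hbit]; simp)]
      rw [ih (j+1) m (by omega)]
      have he0 : a >>> j % 2 = 0 := by
        have hx0 := h0
        simp only [hbit] at hx0
        rcases Nat.mod_two_eq_zero_or_one (a >>> j) with hp | hp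
        · exact hp
        · simp [hp] at hx0
      have he : clmN (a >>> j) b = (clmN (a >>> (j+1)) b) <<< 1 := by
        rw [clm_even (a >>> j) b he0, hdiv]
      rw [he, ← Nat.shiftLeft_add, Nat.add_comm 1 j]
    | true =>
      rw [if_neg (by rw [hgj, hbit]; simp)]
      rw [mulInner_spec a b j m (by omega) hbit hb]
      rw [ih (j+1) (m ^^^ b <<< j) (by omega)]
      have he1 : a >>> j % 2 = 1 := by
        have hx0 := h0
        simp only [hbit] at hx0
        rcases Nat.mod_two_eq_zero_or_one (a >>> j) with hp | hp
        · simp [hp] at hx0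
        · exact hp
      have ho : clmN (a >>> j) b = b ^^^ (clmN (a >>> (j+1)) b) <<< 1 := by
        rw [clm_odd (a >>> j) b he1, hdiv]
      rw [ho, shiftLeft_xor, ← Nat.shiftLeft_add, Nat.add_comm 1 j, Nat.xor_assoc]

theorem mul_spec (a b : Nat) (hA : a < 256) (hb : b < 256) :
    pvMultiplyBinaryPoly ((bitsLE 8 a).reverse) ((bitsLE 8 b).reverse)
      = (bitsLE 16 (clmN a b)).reverse := by
  simp only [pvMultiplyBinaryPoly, List.reverse_reverse, List.length_reverse, length_bitsLE,
    List.range_eq_range']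
  rw [← bitsLE_zero 16, mulOuter_go a b hA hb 8 0 0 rfl]
  simp

theorem rfind1_bitsLE (w n : Nat) (h : n < 2 ^ w) :
    pvRfind1 (bitsLE w n) = if n = 0 then -1 else (Nat.log2 n : Int) := by
  induction w generalizing n with
  | zero =>
    have : n = 0 := by simpa using h
    subst this
    rfl
  | succ w ih =>
    have hn2 : n / 2 < 2 ^ w := by
      rw [pow_succ] at h
      omega
    rw [show bitsLE (w+1) n = (if n % 2 = 1 then '1' else '0') :: bitsLE w (n / 2) from rfl]
    rw [pvRfind1]
    rw [ih (n / 2) hn2]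
    by_cases hz : n / 2 = 0
    · have hn1 : n ≤ 1 := by omega
      interval_cases n
      · simp
      · norm_num
    · have hlog : Nat.log2 n = Nat.log2 (n / 2) + 1 := by
        have hnz : n ≠ 0 := by omega
        have h2z : n / 2 ≠ 0 := hz
        set L := Nat.log2 (n / 2) with hL
        have hle : 2 ^ L ≤ n / 2 := (Nat.le_log2 h2z).mp le_rfl
        have hlt : n / 2 < 2 ^ (L + 1) := (Nat.log2_lt h2z).mp (by omega)
        refine log2_pin n (L + 1) ?_ ?_
        · have : 2 ^ (L + 1) = 2 * 2 ^ L := by ring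
          omega
        · have : 2 ^ (L + 2) = 2 * 2 ^ (L + 1) := by ring
          omega
      rw [if_neg hz, if_neg (by omega : ¬ n = 0), hlog]
      rw [if_pos (by positivity)]
      push_cast
      ring

theorem testBit_log2 (m : Nat) (hm : m ≠ 0) : m.testBit (Nat.log2 m) = true := by
  set L := Nat.log2 m with hL
  have hle : 2 ^ L ≤ m := (Nat.le_log2 hm).mp le_rfl
  have hlt : m < 2 ^ (L + 1) := (Nat.log2_lt hm).mp (by omega)
  have hdiv : m / 2 ^ L = 1 := by
    have h1 : 1 ≤ m / 2 ^ L := (Nat.one_le_div_iff (Nat.two_pow_pos L)).mpr hle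
    have h2 : m / 2 ^ L < 2 := by
      rw [Nat.div_lt_iff_lt_mul (Nat.two_pow_pos L)]
      rw [pow_succ] at hlt
      omega
    omega
  have h1 : m >>> L = 1 := by
    rw [Nat.shiftRight_eq_div_pow]
    exact hdiv
  have h2 : (m >>> L).testBit 0 = m.testBit (L + 0) := Nat.testBit_shiftRight m
  rw [h1] at h2
  have h3 : m.testBit (L + 0) = true := by
    rw [← h2]
    decide
  simpa using h3

theorem testBit_shifted283 (k j : Nat) :
    (283 <<< k).testBit (k + 8) = true ∧ ∀ j', k + 8 < j' → (283 <<< k).testBit j' = false := by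
  constructor
  · rw [Nat.testBit_shiftLeft]
    have h8 : k + 8 - k = 8 := by omega
    have ht : (283 : Nat).testBit 8 = true := by decide
    simp [h8, ht]
  · intro j' hj'
    rw [Nat.testBit_shiftLeft]
    have hlt : (283 : Nat) < 2 ^ (j' - k) := by
      have : (283 : Nat) < 2 ^ 9 := by norm_num
      have h9 : 9 ≤ j' - k := by omega
      calc (283 : Nat) < 2 ^ 9 := by norm_num
        _ ≤ 2 ^ (j' - k) := Nat.pow_le_pow_right (by norm_num) h9
    simp [Nat.testBit_lt_two_pow hlt]

theorem red_dec (m : Nat) (h : 256 ≤ m) :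
    m ^^^ (283 <<< (Nat.log2 m - 8)) < 2 ^ Nat.log2 m := by
  have hm : m ≠ 0 := by omega
  set L := Nat.log2 m with hL
  have hL8 : 8 ≤ L := (Nat.le_log2 hm).mpr (by norm_num; omega)
  have hlt : m < 2 ^ (L + 1) := (Nat.log2_lt hm).mp (by omega)
  obtain ⟨hbt, hhigh⟩ := testBit_shifted283 (L - 8) 0
  have hk8 : L - 8 + 8 = L := by omega
  rw [hk8] at hbt hhigh
  apply lt_two_pow_of_high_false
  intro j hj
  rw [Nat.testBit_xor]
  rcases Nat.lt_or_ge L j with hcase | hcase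
  · have h1 : m.testBit j = false := Nat.testBit_lt_two_pow (by
      calc m < 2 ^ (L + 1) := hlt
        _ ≤ 2 ^ j := Nat.pow_le_pow_right (by norm_num) (by omega))
    have h2 : (283 <<< (L - 8)).testBit j = false := hhigh j (by omega)
    simp [h1, h2]
  · have hjL : j = L := by omega
    subst hjL
    rw [testBit_log2 m hm, hbt]
    rfl

theorem red_lt (f m : Nat) (h : m < 2 ^ (8 + f)) : pvRedN f m < 256 := by
  induction f generalizing m with
  | zero =>
    rw [pvRedN]
    simpa using h
  | succ f ih =>
    rw [pvRedN]
    by_cases hm : 256 ≤ m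
    · rw [if_pos hm]
      have hdec := red_dec m hm
      have hlog : Nat.log2 m ≤ 8 + f := by
        have := (Nat.log2_lt (by omega : m ≠ 0)).mpr h
        omega
      exact ih _ (lt_of_lt_of_le hdec (Nat.pow_le_pow_right (by norm_num) hlog))
    · rw [if_neg hm]
      omega

theorem red_small (f m : Nat) (h : m < 256) : pvRedN f m = m := by
  cases f <;> simp [pvRedN, Nat.not_le.mpr h]

theorem red_fuel (f : Nat) : ∀ f' m, m < 2 ^ (8 + f) → f ≤ f' → pvRedN f' m = pvRedN f m := by
  induction f with
  | zero =>
    intro f' m h hf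
    rw [red_small f' m (by simpa using h)]
    rfl
  | succ f ih =>
    intro f' m h hf
    cases f' with
    | zero => omega
    | succ f'' =>
      simp only [pvRedN]
      by_cases hm : 256 ≤ m
      · rw [if_pos hm, if_pos hm]
        have hdec := red_dec m hm
        have hlog : Nat.log2 m ≤ 8 + f := by
          have := (Nat.log2_lt (by omega : m ≠ 0)).mpr h
          omega
        exact ih f'' _ (lt_of_lt_of_le hdec (Nat.pow_le_pow_right (by norm_num) hlog))
          (by omega)
      · rw [if_neg hm, if_neg hm]

theorem red_lin (f : Nat) : ∀ m r, m < 2 ^ (8 + f) → r < 256 →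
    pvRedN f (m ^^^ r) = pvRedN f m ^^^ r := by
  induction f with
  | zero => intro m r h hr; simp only [pvRedN]
  | succ f ih =>
    intro m r h hr
    by_cases hm : 256 ≤ m
    · have hm0 : m ≠ 0 := by omega
      set L := Nat.log2 m with hL
      have hL8 : 8 ≤ L := (Nat.le_log2 hm0).mpr (by norm_num; omega)
      have hlt : m < 2 ^ (L + 1) := (Nat.log2_lt hm0).mp (by omega)
      have hrL : r < 2 ^ L := by
        calc r < 256 := hr
          _ = 2 ^ 8 := by norm_num
          _ ≤ 2 ^ L := Nat.pow_le_pow_right (by norm_num) hL8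
      have hxr : (m ^^^ r).testBit L = true := by
        rw [Nat.testBit_xor, testBit_log2 m hm0, Nat.testBit_lt_two_pow hrL]
        rfl
      have hge : 2 ^ L ≤ m ^^^ r := Nat.ge_two_pow_of_testBit hxr
      have hlt2 : m ^^^ r < 2 ^ (L + 1) :=
        Nat.xor_lt_two_pow hlt (by
          calc r < 2 ^ L := hrL
            _ ≤ 2 ^ (L + 1) := Nat.pow_le_pow_right (by norm_num) (by omega))
      have hlogxr : Nat.log2 (m ^^^ r) = L := log2_pin _ L hge hlt2
      have hmr : 256 ≤ m ^^^ r := by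
        have : (256 : Nat) = 2 ^ 8 := by norm_num
        rw [this]
        calc (2:Nat) ^ 8 ≤ 2 ^ L := Nat.pow_le_pow_right (by norm_num) hL8
          _ ≤ m ^^^ r := hge
      rw [pvRedN, pvRedN, if_pos hm, if_pos hmr, hlogxr, ← hL]
      have hre : m ^^^ r ^^^ 283 <<< (L - 8) = (m ^^^ 283 <<< (L - 8)) ^^^ r := by
        rw [Nat.xor_assoc, Nat.xor_comm r, ← Nat.xor_assoc]
      rw [hre]
      have hdec := red_dec m hm
      refine ih _ r ?_ hr
      calc m ^^^ 283 <<< (Nat.log2 m - 8) < 2 ^ L := hdec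
        _ ≤ 2 ^ (8 + f) := Nat.pow_le_pow_right (by norm_num) (by
          have := (Nat.log2_lt hm0).mpr h
          omega)
    · have h1 : m < 256 := by omega
      have h2 : m ^^^ r < 256 := by
        have : (256 : Nat) = 2 ^ 8 := by norm_num
        rw [this] at h1 hr ⊢
        exact Nat.xor_lt_two_pow h1 hr
      rw [red_small _ _ h2, red_small _ _ h1]

theorem hi_xor (v : Nat) (h1 : 256 ≤ v) (h2 : v < 512) : v ^^^ 283 < 256 := by
  have hv0 : v ≠ 0 := by omega
  have hlog : Nat.log2 v = 8 := log2_pin v 8 (by norm_num; omega) (by norm_num; omega)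
  apply lt_two_pow_of_high_false _ 8
  intro j hj
  rw [Nat.testBit_xor]
  rcases Nat.lt_or_ge 8 j with hc | hc
  · have hv : v.testBit j = false := Nat.testBit_lt_two_pow (by
      calc v < 512 := h2
        _ = 2 ^ 9 := by norm_num
        _ ≤ 2 ^ j := Nat.pow_le_pow_right (by norm_num) (by omega))
    have hp : (283 : Nat).testBit j = false := Nat.testBit_lt_two_pow (by
      calc (283 : Nat) < 2 ^ 9 := by norm_num
        _ ≤ 2 ^ j := Nat.pow_le_pow_right (by norm_num) (by omega))
    simp [hv, hp]
  · have hj8 : j = 8 := by omega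
    subst hj8
    have hv : v.testBit 8 = true := by
      rw [← hlog]
      exact testBit_log2 v hv0
    have hp : (283 : Nat).testBit 8 = true := by decide
    simp [hv, hp]

theorem red_key (f : Nat) : ∀ m, m < 2 ^ (8 + f) →
    pvRedN (f+1) (m <<< 1) = pvRedN (f+1) ((pvRedN f m) <<< 1) := by
  induction f with
  | zero =>
    intro m h
    rw [red_small 0 m (by simpa using h)]
  | succ f ih =>
    intro m h
    by_cases hm : 256 ≤ m
    · have hm0 : m ≠ 0 := by omega
      set L := Nat.log2 m with hL
      have hL8 : 8 ≤ L := (Nat.le_log2 hm0).mpr (by norm_num; omega)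
      have hlt : m < 2 ^ (L + 1) := (Nat.log2_lt hm0).mp (by omega)
      have hle : 2 ^ L ≤ m := (Nat.le_log2 hm0).mp le_rfl
      have hsh : m <<< 1 = m * 2 := by
        rw [Nat.shiftLeft_eq]
      have hlog2 : Nat.log2 (m <<< 1) = L + 1 := by
        rw [hsh]
        refine log2_pin _ (L + 1) ?_ ?_
        · rw [pow_succ]
          omega
        · rw [pow_succ, pow_succ] at *
          omega
      have h512 : 256 ≤ m <<< 1 := by
        rw [hsh]
        omega
      have hstep : (m <<< 1) ^^^ 283 <<< (Nat.log2 (m <<< 1) - 8)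
          = (m ^^^ 283 <<< (L - 8)) <<< 1 := by
        rw [hlog2, shiftLeft_xor]
        have : L + 1 - 8 = (L - 8) + 1 := by omega
        rw [this, Nat.shiftLeft_add 283 (L - 8) 1]
      have hdec := red_dec m hm
      have hm' : m ^^^ 283 <<< (L - 8) < 2 ^ (8 + f) := by
        calc m ^^^ 283 <<< (L - 8) < 2 ^ L := by rw [hL]; exact hdec
          _ ≤ 2 ^ (8 + f) := Nat.pow_le_pow_right (by norm_num) (by
            have := (Nat.log2_lt hm0).mpr h
            omega)
      have hv : pvRedN f (m ^^^ 283 <<< (L - 8)) < 256 := red_lt f _ hm'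
      calc pvRedN (f+1+1) (m <<< 1)
          = pvRedN (f+1) ((m <<< 1) ^^^ 283 <<< (Nat.log2 (m <<< 1) - 8)) := by
            rw [show pvRedN (f+1+1) (m <<< 1)
              = if 256 ≤ m <<< 1 then
                  pvRedN (f+1) ((m <<< 1) ^^^ 283 <<< (Nat.log2 (m <<< 1) - 8))
                else m <<< 1 from rfl, if_pos h512]
        _ = pvRedN (f+1) ((m ^^^ 283 <<< (L - 8)) <<< 1) := by rw [hstep]
        _ = pvRedN (f+1) ((pvRedN f (m ^^^ 283 <<< (L - 8))) <<< 1) := ih _ hm'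
        _ = pvRedN (f+1+1) ((pvRedN f (m ^^^ 283 <<< (L - 8))) <<< 1) := by
            refine (red_fuel (f+1) (f+1+1) _ ?_ (by omega)).symm
            have : (pvRedN f (m ^^^ 283 <<< (L - 8))) <<< 1 < 512 := by
              rw [Nat.shiftLeft_eq]
              norm_num
              omega
            calc (pvRedN f (m ^^^ 283 <<< (L - 8))) <<< 1 < 512 := this
              _ ≤ 2 ^ (8 + (f+1)) := by
                have : (512 : Nat) = 2 ^ 9 := by norm_num
                rw [this]
                exact Nat.pow_le_pow_right (by norm_num) (by omega)
        _ = pvRedN (f+1+1) ((pvRedN (f+1) m) <<< 1) := by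
            rw [show pvRedN (f+1) m
              = if 256 ≤ m then pvRedN f (m ^^^ 283 <<< (Nat.log2 m - 8)) else m from rfl,
              if_pos hm, ← hL]
    · rw [red_small (f+1) m (by omega)]

theorem red_xt (f b : Nat) (hb : b < 256) : pvRedN (f+1) (b * 2) = xtN b := by
  unfold xtN
  by_cases h2 : 256 ≤ b * 2
  · rw [if_pos h2]
    have h512 : b * 2 < 512 := by omega
    have hlog : Nat.log2 (b * 2) = 8 := log2_pin _ 8 (by norm_num; omega) (by norm_num; omega)
    rw [show pvRedN (f+1) (b * 2)
      = if 256 ≤ b * 2 then pvRedN f ((b * 2) ^^^ 283 <<< (Nat.log2 (b * 2) - 8)) else b * 2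
      from rfl, if_pos h2, hlog]
    norm_num
    exact red_small f _ (hi_xor (b * 2) h2 h512)
  · rw [if_neg h2]
    exact red_small (f+1) _ (by omega)

theorem divStep_spec (m : Nat) (h1 : 256 ≤ m) (h2 : m < 2 ^ 15) :
    pvDivStep (bitsLE 9 283) 8 (bitsLE 16 m) = bitsLE 16 (m ^^^ (283 <<< (Nat.log2 m - 8))) := by
  have hm0 : m ≠ 0 := by omega
  have h16 : m < 2 ^ 16 := by
    calc m < 2 ^ 15 := h2
      _ ≤ 2 ^ 16 := by norm_num
  have hlog14 : Nat.log2 m < 15 := (Nat.log2_lt hm0).mpr h2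
  have hlog8 : 8 ≤ Nat.log2 m := (Nat.le_log2 hm0).mpr (by norm_num; omega)
  set k := Nat.log2 m - 8 with hk
  simp only [pvDivStep]
  rw [rfind1_bitsLE 16 m h16, if_neg hm0]
  have htn : ((Nat.log2 m : Int) - 8).toNat = k := by omega
  rw [htn, length_bitsLE, List.range_eq_range']
  have hg : ∀ x j, j < 9 →
      (fun b1 bit2 =>
        if (bitsLE 9 283).getD bit2 ' ' = '0' then b1
        else b1.set (bit2 + k) (if b1.getD (bit2 + k) ' ' = '1' then '0' else '1'))
        (bitsLE 16 x) j
      = bitsLE 16 (if (283 : Nat).testBit j then x ^^^ 2 ^ (k + j) else x) := by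
    intro x j hj
    have hgj : (bitsLE 9 283).getD j ' ' = if (283 : Nat).testBit j then '1' else '0' :=
      getD_bitsLE 9 283 j hj
    have hx : (bitsLE 16 x).getD (j + k) ' ' = if x.testBit (j + k) then '1' else '0' :=
      getD_bitsLE 16 x (j + k) (by omega)
    have hsf := set_flip 16 x (j + k) (by omega)
    simp only [hgj, hx]
    cases hbj : (283 : Nat).testBit j with
    | false => simp
    | true =>
      rw [if_neg (by simp)]
      have hch : (if (if x.testBit (j + k) then '1' else '0') = '1' then '0' else '1')
          = (if x.testBit (j + k) then '0' else '1') := by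
        cases hxb : x.testBit (j + k) <;> simp
      rw [hch, hsf, Nat.add_comm j k]
      simp
  have := flip_go (fun b1 bit2 =>
        if (bitsLE 9 283).getD bit2 ' ' = '0' then b1
        else b1.set (bit2 + k) (if b1.getD (bit2 + k) ' ' = '1' then '0' else '1'))
      283 9 k (by norm_num) hg 9 0 m rfl
  simpa using this

theorem divLoop_spec (fuel : Nat) : ∀ m, m < 2 ^ 15 →
    pvDivLoop (bitsLE 9 283) 8 fuel (bitsLE 16 m) = bitsLE 16 (pvRedN fuel m) := by
  induction fuel with
  | zero =>
    intro m hm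
    rw [show pvRedN 0 m = m from rfl]
    rfl
  | succ fuel ih =>
    intro m hm
    have h16 : m < 2 ^ 16 := by
      calc m < 2 ^ 15 := hm
        _ ≤ 2 ^ 16 := by norm_num
    rw [show pvDivLoop (bitsLE 9 283) 8 (fuel+1) (bitsLE 16 m)
      = if pvRfind1 (bitsLE 16 m) ≥ 8 then
          pvDivLoop (bitsLE 9 283) 8 fuel (pvDivStep (bitsLE 9 283) 8 (bitsLE 16 m))
        else bitsLE 16 m from rfl]
    rw [rfind1_bitsLE 16 m h16]
    rw [show pvRedN (fuel+1) m
      = if 256 ≤ m then pvRedN fuel (m ^^^ 283 <<< (Nat.log2 m - 8)) else m from rfl]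
    by_cases hm256 : 256 ≤ m
    · have hm0 : m ≠ 0 := by omega
      have hge : ((Nat.log2 m : Int) ≥ 8) := by
        have := (Nat.le_log2 hm0).mpr (by norm_num; omega : 2 ^ 8 ≤ m)
        omega
      rw [if_neg hm0, if_pos hge, if_pos hm256]
      rw [divStep_spec m hm256 hm]
      refine ih _ ?_
      have hdec := red_dec m hm256
      have : Nat.log2 m ≤ 14 := by
        have := (Nat.log2_lt hm0).mpr hm
        omega
      calc m ^^^ 283 <<< (Nat.log2 m - 8) < 2 ^ Nat.log2 m := hdec
        _ ≤ 2 ^ 15 := Nat.pow_le_pow_right (by norm_num) (by omega)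
    · rw [if_neg hm256]
      by_cases hm0 : m = 0
      · rw [if_pos hm0]
        norm_num
      · rw [if_neg hm0]
        have : Nat.log2 m < 8 := (Nat.log2_lt hm0).mpr (by norm_num; omega)
        rw [if_neg (by omega)]

theorem div_spec (M : Nat) (h : M < 2 ^ 15) :
    pvDivideBinaryPoly ((bitsLE 16 M).reverse) pvPoly = (bitsLE 9 (pvRedN 17 M)).reverse := by
  have hpoly : pvPoly.reverse = bitsLE 9 283 := by decide
  have hrf : pvRfind1 (bitsLE 9 283) = 8 := by decide
  simp only [pvDivideBinaryPoly, List.reverse_reverse, List.length_reverse, length_bitsLE,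
    hpoly, hrf]
  rw [show (16 : Nat) + 1 = 17 from rfl, divLoop_spec 17 M h]
  rw [show pvPoly.length = 9 from rfl, take_bitsLE 16 9 _ (by omega)]

theorem xt_lt (b : Nat) (h : b < 256) : xtN b < 256 := by
  unfold xtN
  by_cases h2 : 256 ≤ b * 2
  · rw [if_pos h2]
    exact hi_xor (b * 2) h2 (by omega)
  · rw [if_neg h2]
    omega

theorem gf_lt (a b : Nat) (h : b < 256) : gfN a b < 256 := by
  induction a using Nat.strong_induction_on generalizing b with
  | _ a ih =>
    rw [gfN]
    by_cases ha : a = 0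
    · rw [dif_pos ha]
      omega
    · rw [dif_neg ha]
      have h1 : (if a % 2 = 1 then b else 0) < 2 ^ 8 := by
        split <;> norm_num
        omega
      have h2 : gfN (a / 2) (xtN b) < 2 ^ 8 := by
        have := ih (a / 2) (Nat.div_lt_self (Nat.pos_of_ne_zero ha) (by norm_num))
          (xtN b) (xt_lt b h)
        norm_num
        omega
      have := Nat.xor_lt_two_pow h1 h2
      norm_num at this
      omega

theorem clm_zero (c : Nat) : clmN 0 c = 0 := by
  rw [clmN]
  simp

theorem gf_zero (c : Nat) : gfN 0 c = 0 := by
  rw [gfN]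
  simp

theorem xor283_cancel (u v : Nat) : (u ^^^ 283) ^^^ (v ^^^ 283) = u ^^^ v := by
  apply Nat.eq_of_testBit_eq
  intro i
  simp only [Nat.testBit_xor]
  cases u.testBit i <;> cases v.testBit i <;> cases (283 : Nat).testBit i <;> rfl

theorem xor283_left (u v : Nat) : (u ^^^ 283) ^^^ v = (u ^^^ v) ^^^ 283 := by
  apply Nat.eq_of_testBit_eq
  intro i
  simp only [Nat.testBit_xor]
  cases u.testBit i <;> cases v.testBit i <;> cases (283 : Nat).testBit i <;> rfl

theorem xor283_right (u v : Nat) : u ^^^ (v ^^^ 283) = (u ^^^ v) ^^^ 283 := by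
  apply Nat.eq_of_testBit_eq
  intro i
  simp only [Nat.testBit_xor]
  cases u.testBit i <;> cases v.testBit i <;> cases (283 : Nat).testBit i <;> rfl

theorem testBit7_iff (z : Nat) (hz : z < 256) : z.testBit 7 = decide (128 ≤ z) := by
  have h2 : (z >>> 7).testBit 0 = z.testBit (7 + 0) := Nat.testBit_shiftRight z
  rw [Nat.testBit_zero, Nat.shiftRight_eq_div_pow] at h2
  have h3 : z.testBit 7 = decide (z / 2 ^ 7 % 2 = 1) := by
    rw [← h2]
  rw [h3]
  by_cases h : 128 ≤ z
  · have hd : z / 128 = 1 := by omega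
    simp [hd, h]
  · have hd : z / 128 = 0 := by omega
    simp [hd, h]

theorem xt_linear (x y : Nat) (hx : x < 256) (hy : y < 256) :
    xtN (x ^^^ y) = xtN x ^^^ xtN y := by
  have hxy : x ^^^ y < 256 := by
    have h256 : (256 : Nat) = 2 ^ 8 := by norm_num
    rw [h256] at hx hy ⊢
    exact Nat.xor_lt_two_pow hx hy
  have hb : (x ^^^ y).testBit 7 = (x.testBit 7 ^^ y.testBit 7) := Nat.testBit_xor x y 7
  rw [testBit7_iff x hx, testBit7_iff y hy, testBit7_iff (x ^^^ y) hxy] at hb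
  unfold xtN
  have hsh : (x ^^^ y) * 2 = x * 2 ^^^ y * 2 := by
    have h1 : ∀ z : Nat, z * 2 = z <<< 1 := by
      intro z
      rw [Nat.shiftLeft_eq]
    rw [h1, h1, h1, shiftLeft_xor]
  by_cases h7x : 128 ≤ x <;> by_cases h7y : 128 ≤ y
  · have h7xy : ¬ 128 ≤ x ^^^ y := by
      simp [h7x, h7y] at hb
      omega
    rw [if_neg (by omega), if_pos (by omega), if_pos (by omega), hsh, xor283_cancel]
  · have h7xy : 128 ≤ x ^^^ y := by
      simp [h7x, h7y] at hb
      omega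
    rw [if_pos (by omega), if_pos (by omega), if_neg (by omega), hsh, xor283_left]
  · have h7xy : 128 ≤ x ^^^ y := by
      simp [h7x, h7y] at hb
      omega
    rw [if_pos (by omega), if_neg (by omega), if_pos (by omega), hsh, xor283_right]
  · have h7xy : ¬ 128 ≤ x ^^^ y := by
      simp [h7x, h7y] at hb
      omega
    rw [if_neg (by omega), if_neg (by omega), if_neg (by omega), hsh]

theorem gf_xt_comm (a : Nat) : ∀ b, b < 256 → gfN a (xtN b) = xtN (gfN a b) := by
  induction a using Nat.strong_induction_on with
  | _ a ih =>
    intro b hb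
    by_cases ha : a = 0
    · subst ha
      rw [gf_zero, gf_zero]
      unfold xtN
      norm_num
    · have hdiv : a / 2 < a := Nat.div_lt_self (Nat.pos_of_ne_zero ha) (by norm_num)
      have hxtb : xtN b < 256 := xt_lt b hb
      have hg : gfN (a / 2) (xtN b) < 256 := gf_lt (a / 2) (xtN b) hxtb
      have hr : (if a % 2 = 1 then b else 0) < 256 := by split <;> omega
      rw [show gfN a (xtN b)
        = (if a % 2 = 1 then xtN b else 0) ^^^ gfN (a / 2) (xtN (xtN b)) from by
          rw [gfN, dif_neg ha]]
      rw [show gfN a b = (if a % 2 = 1 then b else 0) ^^^ gfN (a / 2) (xtN b) from by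
          rw [gfN, dif_neg ha]]
      rw [xt_linear _ _ hr hg]
      rw [ih (a / 2) hdiv (xtN b) hxtb]
      congr 1
      by_cases hpar : a % 2 = 1
      · rw [if_pos hpar, if_pos hpar]
      · rw [if_neg hpar, if_neg hpar]
        unfold xtN
        norm_num

theorem clm_lt (k : Nat) : ∀ a b, a < 2 ^ (k+1) → b < 256 → clmN a b < 2 ^ (k + 8) := by
  induction k with
  | zero =>
    intro a b ha hb
    interval_cases a
    · rw [clm_zero]
      positivity
    · rw [clmN, dif_neg (by norm_num : (1:Nat) ≠ 0), clm_zero]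
      simp [Nat.zero_shiftLeft]
      omega
  | succ k ih =>
    intro a b ha hb
    rw [clmN]
    by_cases h0 : a = 0
    · rw [dif_pos h0]
      positivity
    · rw [dif_neg h0]
      have h1 : (if a % 2 = 1 then b else 0) < 2 ^ (k + 1 + 8) := by
        split
        · calc b < 256 := hb
            _ = 2 ^ 8 := by norm_num
            _ ≤ 2 ^ (k + 1 + 8) := Nat.pow_le_pow_right (by norm_num) (by omega)
        · positivity
      have h2 : (clmN (a / 2) b) <<< 1 < 2 ^ (k + 1 + 8) := by
        have := ih (a / 2) b (by omega) hb
        rw [Nat.shiftLeft_eq]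
        have he : 2 ^ (k + 1 + 8) = 2 ^ (k + 8) * 2 := by ring
        rw [he]
        omega
      exact Nat.xor_lt_two_pow h1 h2

theorem red_clm_eq_gf (w : Nat) : ∀ a b, a < 2 ^ (w+1) → b < 256 →
    pvRedN (w+1) (clmN a b) = gfN a b := by
  induction w with
  | zero =>
    intro a b ha hb
    interval_cases a
    · rw [clm_zero, gf_zero]
      exact red_small 1 0 (by norm_num)
    · have hc1 : clmN 1 b = b := by
        rw [clmN, dif_neg (by norm_num : (1:Nat) ≠ 0), clm_zero]
        simp [Nat.zero_shiftLeft]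
      have hg1 : gfN 1 b = b := by
        rw [gfN, dif_neg (by norm_num : (1:Nat) ≠ 0), gf_zero]
        simp
      rw [hc1, hg1]
      exact red_small 1 b hb
  | succ w ih =>
    intro a b ha hb
    by_cases h0 : a = 0
    · subst h0
      rw [clm_zero, gf_zero]
      exact red_small (w+1+1) 0 (by norm_num)
    · rw [clmN, dif_neg h0, gfN, dif_neg h0]
      have hC : clmN (a / 2) b < 2 ^ (w + 8) := clm_lt w (a / 2) b (by
        rw [pow_succ] at ha
        omega) hb
      have hCs : (clmN (a / 2) b) <<< 1 < 2 ^ (8 + (w + 1)) := by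
        rw [Nat.shiftLeft_eq]
        have he : 2 ^ (8 + (w + 1)) = 2 ^ (w + 8) * 2 := by ring
        rw [he]
        omega
      have hr : (if a % 2 = 1 then b else 0) < 256 := by split <;> omega
      have hCs2 : (clmN (a / 2) b) <<< 1 < 2 ^ (8 + (w + 1 + 1)) := by
        calc (clmN (a / 2) b) <<< 1 < 2 ^ (8 + (w + 1)) := hCs
          _ ≤ 2 ^ (8 + (w + 1 + 1)) := Nat.pow_le_pow_right (by norm_num) (by omega)
      rw [Nat.xor_comm (if a % 2 = 1 then b else 0) ((clmN (a / 2) b) <<< 1)]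
      rw [red_lin (w + 1 + 1) _ _ hCs2 hr]
      have hkey := red_key (w + 1) (clmN (a / 2) b) (by
        calc clmN (a / 2) b < 2 ^ (w + 8) := hC
          _ ≤ 2 ^ (8 + (w + 1)) := Nat.pow_le_pow_right (by norm_num) (by omega))
      rw [hkey]
      rw [ih (a / 2) b (by rw [pow_succ] at ha; omega) hb]
      have hgf : gfN (a / 2) b < 256 := gf_lt (a / 2) b hb
      have hshift : (gfN (a / 2) b) <<< 1 = gfN (a / 2) b * 2 := by
        rw [Nat.shiftLeft_eq]
      rw [hshift, red_xt (w + 1) (gfN (a / 2) b) hgf]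
      rw [gf_xt_comm (a / 2) b hb]
      rw [Nat.xor_comm]

-- ---- decide lemmas (small finite domains) ----

set_option maxRecDepth 100000 in
theorem zfill_bin (a : Nat) (h : a < 256) :
    PySem.Chars.zfill (pvBinDrop2 (a : Int)) 8 = (bitsLE 8 a).reverse := by
  revert a h; decide

set_option maxRecDepth 100000 in
theorem parse_bits9 (m : Nat) (h : m < 256) :
    PySem.Int.ofCharsBase? ((bitsLE 9 m).reverse) 2 = some (m : Int) := by
  revert m h; decide

set_option maxRecDepth 100000 in
theorem parse_0b (n : Nat) (h : n < 256) :
    PySem.Int.ofCharsBase? ('0' :: 'b' :: pvBinDrop2 (n : Int)) 2 = some (n : Int) := by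
  revert n h; decide

-- ---- B-side fold characterization ----

theorem step1 (p a b : Nat) :
    stepN (p, a, b) = (p ^^^ (if a % 2 = 1 then b else 0), a / 2, xtN b) := by
  unfold stepN
  by_cases h : a % 2 = 1 <;> simp [h]

theorem G_split (w : Nat) : ∀ p a b, (stepN^[w] (p, a, b)).1 = p ^^^ (stepN^[w] (0, a, b)).1 := by
  induction w with
  | zero => intro p a b; simp
  | succ w ih =>
    intro p a b
    rw [Function.iterate_succ_apply, Function.iterate_succ_apply, step1, step1]
    rw [ih (p ^^^ (if a % 2 = 1 then b else 0)) (a / 2) (xtN b)]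
    rw [ih (0 ^^^ (if a % 2 = 1 then b else 0)) (a / 2) (xtN b)]
    rw [Nat.zero_xor, Nat.xor_assoc]

theorem G_eq_gf (w : Nat) : ∀ a b, a < 2 ^ w → (stepN^[w] (0, a, b)).1 = gfN a b := by
  induction w with
  | zero =>
    intro a b ha
    have : a = 0 := by omega
    subst this
    rw [gf_zero]
    simp
  | succ w ih =>
    intro a b ha
    rw [Function.iterate_succ_apply, step1, Nat.zero_xor]
    rw [G_split w (if a % 2 = 1 then b else 0) (a / 2) (xtN b)]
    rw [ih (a / 2) (xtN b) (by rw [pow_succ] at ha; omega)]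
    by_cases h0 : a = 0
    · subst h0
      rw [gf_zero]
      simp [gf_zero]
    · rw [show gfN a b = (if a % 2 = 1 then b else 0) ^^^ gfN (a / 2) (xtN b) from by
        rw [gfN, dif_neg h0]]

theorem foldl_const_iterate {α β : Type} (f : β → β) :
    ∀ (l : List α) (s : β), l.foldl (fun s _ => f s) s = f^[l.length] s := by
  intro l
  induction l with
  | nil => intro s; rfl
  | cons x xs ih =>
    intro s
    rw [List.foldl_cons, ih (f s), List.length_cons, Function.iterate_succ_apply]

theorem stepI_cast (s : Nat × Nat × Nat) :
    (fun (s : Int × Int × Int) =>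
      let p := if PySem.Int.mod s.2.1 2 ≠ 0 then PySem.Int.bxor s.1 s.2.2 else s.1
      let a' := PySem.Int.floordiv s.2.1 2
      let b' := s.2.2 * 2
      (p, a', if 256 ≤ b' then PySem.Int.bxor b' 283 else b'))
        ((s.1 : Int), (s.2.1 : Int), (s.2.2 : Int))
      = (((stepN s).1 : Int), ((stepN s).2.1 : Int), ((stepN s).2.2 : Int)) := by
  obtain ⟨p, a, b⟩ := s
  have e1 : PySem.Int.mod (a : Int) 2 = ((a % 2 : Nat) : Int) := by
    exact_mod_cast PySem.Int.mod_natCast a 2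
  have e2 : PySem.Int.floordiv (a : Int) 2 = ((a / 2 : Nat) : Int) := by
    exact_mod_cast PySem.Int.floordiv_natCast a 2
  have e3 : ((b : Int) * 2) = ((b * 2 : Nat) : Int) := by push_cast; ring
  have e5 : PySem.Int.bxor (p : Int) (b : Int) = ((p ^^^ b : Nat) : Int) :=
    PySem.Int.bxor_natCast p b
  have e4 : PySem.Int.bxor ((b * 2 : Nat) : Int) 283 = (((b * 2) ^^^ 283 : Nat) : Int) := by
    exact_mod_cast PySem.Int.bxor_natCast (b * 2) 283
  simp only [step1]
  first
  | dsimp only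
  | skip
  rw [e1, e2, e3]
  unfold xtN
  by_cases h : a % 2 = 1
  · rw [if_pos (show ((a % 2 : Nat) : Int) ≠ 0 by rw [h]; norm_num), if_pos h, e5]
    by_cases h2 : 256 ≤ b * 2
    · rw [if_pos (show (256 : Int) ≤ ((b * 2 : Nat) : Int) by exact_mod_cast h2),
        if_pos h2, e4]
    · rw [if_neg (show ¬ (256 : Int) ≤ ((b * 2 : Nat) : Int) by exact_mod_cast h2),
        if_neg h2]
  · have h0 : a % 2 = 0 := by omega
    rw [if_neg (show ¬ ((a % 2 : Nat) : Int) ≠ 0 by rw [h0]; norm_num), if_neg h,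
      Nat.xor_zero]
    by_cases h2 : 256 ≤ b * 2
    · rw [if_pos (show (256 : Int) ≤ ((b * 2 : Nat) : Int) by exact_mod_cast h2),
        if_pos h2, e4]
    · rw [if_neg (show ¬ (256 : Int) ≤ ((b * 2 : Nat) : Int) by exact_mod_cast h2),
        if_neg h2]

-- ---- per-pair equality ----

theorem pair_spec (a b : Nat) (ha : a < 256) (hb : b < 256) :
    pvDivideBinaryPoly
        (pvMultiplyBinaryPoly (PySem.Chars.zfill (pvBinDrop2 (a : Int)) 8)
                              (PySem.Chars.zfill (pvBinDrop2 (b : Int)) 8)) pvPoly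
      = (bitsLE 9 (gfN a b)).reverse := by
  have hclm : clmN a b < 2 ^ 15 := by
    have := clm_lt 7 a b (by norm_num; omega) hb
    norm_num at this ⊢
    omega
  rw [zfill_bin a ha, zfill_bin b hb, mul_spec a b ha hb, div_spec (clmN a b) hclm]
  have hfuel : pvRedN 17 (clmN a b) = pvRedN 8 (clmN a b) :=
    red_fuel 8 17 (clmN a b) (by
      calc clmN a b < 2 ^ 15 := hclm
        _ ≤ 2 ^ (8 + 8) := by norm_num) (by omega)
  rw [hfuel]
  rw [red_clm_eq_gf 7 a b (by norm_num; omega) hb]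

theorem foldl_rel {α β γ : Type} (R : α → β → Prop) (f : α → γ → α) (g : β → γ → β) :
    ∀ (l : List γ) a b, R a b → (∀ x ∈ l, ∀ a' b', R a' b' → R (f a' x) (g b' x)) →
      R (l.foldl f a) (l.foldl g b) := by
  intro l
  induction l with
  | nil => intro a b hR _; exact hR
  | cons x xs ih =>
    intro a b hR hstep
    rw [List.foldl_cons, List.foldl_cons]
    exact ih (f a x) (g b x) (hstep x (by simp) a b hR)
      (fun y hy a' b' h' => hstep y (by simp [hy]) a' b' h')

theorem iter_cast (f : Int × Int × Int → Int × Int × Int)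
    (hf : ∀ s : Nat × Nat × Nat,
      f ((s.1 : Int), (s.2.1 : Int), (s.2.2 : Int))
        = (((stepN s).1 : Int), ((stepN s).2.1 : Int), ((stepN s).2.2 : Int))) :
    ∀ (w : Nat) (s : Nat × Nat × Nat),
      f^[w] ((s.1 : Int), (s.2.1 : Int), (s.2.2 : Int))
        = (((stepN^[w] s).1 : Int), ((stepN^[w] s).2.1 : Int), ((stepN^[w] s).2.2 : Int)) := by
  intro w
  induction w with
  | zero => intro s; simp
  | succ w ih =>
    intro s
    rw [Function.iterate_succ_apply, Function.iterate_succ_apply, hf s, ih (stepN s)]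

theorem okByte_elim (s : String) (h : pvOkByte s = true) :
    ∃ n : Nat, n < 256 ∧ PySem.Int.ofStrBase? s 16 = some (n : Int) := by
  unfold pvOkByte at h
  cases hp : PySem.Int.ofStrBase? s 16 with
  | none => rw [hp] at h; simp at h
  | some v =>
    rw [hp] at h
    simp at h
    have hv : v = (v.toNat : Int) := by omega
    exact ⟨v.toNat, by omega, congrArg _ hv⟩

theorem fmt_eq (n : Nat) :
    pvFormat02x (n : Int) = PySem.Chars.zfill (pvHexDrop2 (n : Int)) 2 := by
  unfold pvFormat02x pvHexDrop2
  rw [if_neg (show ¬ (n : Int) < 0 by omega), if_neg (show ¬ (n : Int) < 0 by omega)]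

theorem bits9_rev_ne_nil (m : Nat) : (bitsLE 9 m).reverse ≠ [] := by
  intro hnil
  have := congrArg List.length hnil
  simp [length_bitsLE] at this

theorem parse_nil : PySem.Int.ofCharsBase? ([] : List Char) 2 = none := by decide

-- ===== VERDICT (by name: the statement is the Claim_ definition above) =====
theorem galois_spec : Claim_equal_galois := by
  intro l1 l2 hdom hpre
  obtain ⟨hne, hlen, hok⟩ := hpre
  show galois l1 l2 = galois_alt l1 l2
  simp only [galois, galois_alt]
  rw [if_pos (by
    rw [List.all_eq_true]
    intro i hi
    obtain ⟨ha1, ha2⟩ := hok i (List.mem_range.mp hi)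
    obtain ⟨an, han, hpa⟩ := okByte_elim _ ha1
    obtain ⟨bn, hbn, hpb⟩ := okByte_elim _ ha2
    rw [hpa, hpb]
    simp only [Option.getD_some, pvByteOk]
    norm_num
    omega)]
  have hrel := foldl_rel
    (fun (res : List Char) (acc : Int) => (res = [] ∧ acc = 0) ∨
      (∃ n : Nat, n < 256 ∧ res ≠ [] ∧
        PySem.Int.ofCharsBase? res 2 = some (n : Int) ∧ acc = (n : Int)))
    (fun result i =>
      let h1 := (PySem.Int.ofStrBase? (l1.getD i "") 16).getD 0
      let h2 := (PySem.Int.ofStrBase? (l2.getD i "") 16).getD 0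
      let mult := pvMultiplyBinaryPoly (PySem.Chars.zfill (pvBinDrop2 h1) 8)
                                       (PySem.Chars.zfill (pvBinDrop2 h2) 8)
      let div := pvDivideBinaryPoly mult pvPoly
      if result = [] then div
      else '0' :: 'b' :: pvBinDrop2 (PySem.Int.bxor
        ((PySem.Int.ofCharsBase? result 2).getD 0) ((PySem.Int.ofCharsBase? div 2).getD 0)))
    (fun acc i =>
      let a := (PySem.Int.ofStrBase? (l1.getD i "") 16).getD 0
      let b := (PySem.Int.ofStrBase? (l2.getD i "") 16).getD 0
      let s := (List.range 8).foldl (fun (s : Int × Int × Int) _ =>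
        let p := if PySem.Int.mod s.2.1 2 ≠ 0 then PySem.Int.bxor s.1 s.2.2 else s.1
        let a' := PySem.Int.floordiv s.2.1 2
        let b' := s.2.2 * 2
        (p, a', if 256 ≤ b' then PySem.Int.bxor b' 283 else b')) (0, a, b)
      PySem.Int.bxor acc s.1)
    (List.range l1.length) [] 0 (Or.inl ⟨rfl, rfl⟩) ?_
  · rcases hrel with ⟨h1, h2⟩ | ⟨n, hn, hne', hparse, hacc⟩
    · rw [h1, h2, parse_nil]
      decide
    · rw [hparse, hacc, Option.getD_some, fmt_eq n]
  · intro i hi res acc hR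
    have hi' : i < l1.length := List.mem_range.mp hi
    obtain ⟨ha1, ha2⟩ := hok i hi'
    obtain ⟨an, han, hpa⟩ := okByte_elim _ ha1
    obtain ⟨bn, hbn, hpb⟩ := okByte_elim _ ha2
    have hglt : gfN an bn < 256 := gf_lt an bn hbn
    dsimp only
    rw [hpa, hpb, Option.getD_some, Option.getD_some, pair_spec an bn han hbn]
    have hBval : ((List.range 8).foldl (fun (s : Int × Int × Int) _ =>
        let p := if PySem.Int.mod s.2.1 2 ≠ 0 then PySem.Int.bxor s.1 s.2.2 else s.1
        let a' := PySem.Int.floordiv s.2.1 2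
        let b' := s.2.2 * 2
        (p, a', if 256 ≤ b' then PySem.Int.bxor b' 283 else b'))
        ((0 : Int), (an : Int), (bn : Int))).1 = ((gfN an bn : Nat) : Int) := by
      rw [foldl_const_iterate (fun (s : Int × Int × Int) =>
        let p := if PySem.Int.mod s.2.1 2 ≠ 0 then PySem.Int.bxor s.1 s.2.2 else s.1
        let a' := PySem.Int.floordiv s.2.1 2
        let b' := s.2.2 * 2
        (p, a', if 256 ≤ b' then PySem.Int.bxor b' 283 else b')) (List.range 8)]
      rw [show ((0 : Int), (an : Int), (bn : Int))
        = (((0 : Nat) : Int), (((0 : Nat), an, bn).2.1 : Int), (((0 : Nat), an, bn).2.2 : Int))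
        from by norm_num]
      rw [iter_cast _ stepI_cast (List.range 8).length ((0 : Nat), an, bn)]
      rw [show (List.range 8).length = 8 from by simp]
      rw [G_eq_gf 8 an bn (by norm_num; omega)]
    rw [hBval]
    rcases hR with ⟨h1, h2⟩ | ⟨n, hn, hne', hparse, hacc⟩
    · rw [h1, h2, if_pos rfl]
      refine Or.inr ⟨gfN an bn, hglt, bits9_rev_ne_nil _, parse_bits9 _ hglt, ?_⟩
      rw [show (0 : Int) = ((0 : Nat) : Int) from by norm_num, PySem.Int.bxor_natCast]
      norm_num
    · rw [if_neg hne', hparse, hacc, Option.getD_some, parse_bits9 _ hglt,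
        Option.getD_some, PySem.Int.bxor_natCast]
      have hxlt : n ^^^ gfN an bn < 256 := by
        have h256 : (256 : Nat) = 2 ^ 8 := by norm_num
        rw [h256] at hn hglt ⊢
        exact Nat.xor_lt_two_pow hn hglt
      exact Or.inr ⟨n ^^^ gfN an bn, hxlt, by simp, parse_0b _ hxlt, rfl⟩
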